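-- pv_equiv track=rewrite | github.com/NextStep-ns/Robots-Autonomous-Exploration | in424_nav/agent.py | group_frontier
-- ===== SOURCE A (Python) =====
-- def group_frontier(frontier_points):
--     grouped_frontiers = []
--     for point in frontier_points:
--         grouped = False
--         for group in grouped_frontiers:
--             if any(abs(point[0] - p[0]) <= 1 and abs(point[1] - p[1]) <= 1 for p in group):
--                 group.append(point)
--                 grouped = True
--                 break
--         if not grouped:
--             grouped_frontiers.append([point])
--     return grouped_frontiers
-- ===== SOURCE B (Python) =====
-- def group_frontier(frontier_points):
--     groups = []
--     cell_min = {}  # cell -> smallest index of a group containing a point at that cell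
--     for q in frontier_points:
--         x, y = q
--         cand = [cell_min[(x + dx, y + dy)]
--                 for dx in (-1, 0, 1) for dy in (-1, 0, 1)
--                 if (x + dx, y + dy) in cell_min]
--         if cand:
--             i = min(cand)
--             groups[i].append(q)
--         else:
--             i = len(groups)
--             groups.append([q])
--         if (x, y) not in cell_min or i < cell_min[(x, y)]:
--             cell_min[(x, y)] = i
--     return groups
-- ===== Notes on version B (the rewrite author's own statement) =====
-- stated objective: faster
-- what changed: Replaces the nested scan over all existing groups/points by a spatial hash mapping each occupied cell to the smallest index of a group with a point there; each point looks up its 9 neighbour cells and joins the minimum-index group found (which equals A's first matching group), so the inner O(n) scan disappears.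
import Mathlib
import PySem

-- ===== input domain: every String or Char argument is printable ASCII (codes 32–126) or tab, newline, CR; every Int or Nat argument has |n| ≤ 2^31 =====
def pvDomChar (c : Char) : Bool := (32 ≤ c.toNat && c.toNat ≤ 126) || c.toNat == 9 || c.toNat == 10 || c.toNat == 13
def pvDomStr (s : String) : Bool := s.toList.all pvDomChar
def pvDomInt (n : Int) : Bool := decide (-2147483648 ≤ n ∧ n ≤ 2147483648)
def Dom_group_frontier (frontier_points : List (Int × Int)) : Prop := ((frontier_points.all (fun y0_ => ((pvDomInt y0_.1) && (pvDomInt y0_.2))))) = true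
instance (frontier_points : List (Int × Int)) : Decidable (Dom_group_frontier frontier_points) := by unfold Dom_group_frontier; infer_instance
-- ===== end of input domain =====

-- B replaces A's quadratic scan over all groups by a spatial hash (cell -> minimal group
-- index there); joining the minimum index found in the 9 neighbour cells equals A's
-- first-matching-group rule. Objective: faster (asymptotic). Return values are identical;
-- A mutates nothing observable beyond building its result.

-- ===== PORT A =====
def pvAnyAdj (q : Int × Int) (g : List (Int × Int)) : Bool :=
  g.any (fun p => decide (|q.1 - p.1| ≤ 1) && decide (|q.2 - p.2| ≤ 1))

def pvInsertA (q : Int × Int) : List (List (Int × Int)) → List (List (Int × Int))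
  | [] => [[q]]
  | g :: gs => if pvAnyAdj q g then (g ++ [q]) :: gs else g :: pvInsertA q gs

def group_frontier (frontier_points : List (Int × Int)) : List (List (Int × Int)) :=
  frontier_points.foldl (fun acc q => pvInsertA q acc) []

-- ===== PORT B =====
-- the 9 neighbour cells of q (dx outer loop, dy inner loop, as in Source B)
def pvNbrs (q : Int × Int) : List (Int × Int) :=
  ([-1, 0, 1] : List Int).flatMap (fun dx => ([-1, 0, 1] : List Int).map (fun dy => (q.1 + dx, q.2 + dy)))

-- groups[i].append(q)
def pvAppendAt (q : Int × Int) : List (List (Int × Int)) → Nat → List (List (Int × Int))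
  | [], _ => []
  | g :: gs, 0 => (g ++ [q]) :: gs
  | g :: gs, n + 1 => g :: pvAppendAt q gs n

-- if (x,y) not in cell_min or i < cell_min[(x,y)]: cell_min[(x,y)] = i
def pvUpd (d : PySem.Dict (Int × Int) Nat) (q : Int × Int) (i : Nat) : PySem.Dict (Int × Int) Nat :=
  match d.get? q with
  | none => d.insert q i
  | some m => if i < m then d.insert q i else d

def pvStepB (st : List (List (Int × Int)) × PySem.Dict (Int × Int) Nat) (q : Int × Int) :
    List (List (Int × Int)) × PySem.Dict (Int × Int) Nat :=
  let cand := (pvNbrs q).filterMap (fun c => st.2.get? c)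
  match cand with
  | [] => (st.1 ++ [[q]], pvUpd st.2 q st.1.length)
  | c :: cs => (pvAppendAt q st.1 (cs.foldl min c), pvUpd st.2 q (cs.foldl min c))

def group_frontier_alt (frontier_points : List (Int × Int)) : List (List (Int × Int)) :=
  (frontier_points.foldl pvStepB ([], PySem.Dict.empty)).1

-- ===== PRECONDITION & SPEC =====
def Spec_group_frontier (frontier_points : List (Int × Int)) (out : List (List (Int × Int))) : Prop := out = group_frontier_alt frontier_points
instance (frontier_points : List (Int × Int)) (out : List (List (Int × Int))) : Decidable (Spec_group_frontier frontier_points out) := by unfold Spec_group_frontier; infer_instance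

-- ===== CLAIM (what is proved, stated in full; the proofs are below) =====
def Claim_equal_group_frontier : Prop := ∀ (frontier_points : List (Int × Int)), Dom_group_frontier frontier_points → Spec_group_frontier frontier_points (group_frontier frontier_points)

-- ===== LEMMAS AND PROOFS =====

-- cell c occurs in group number i
def SAt (groups : List (List (Int × Int))) (c : Int × Int) (i : Nat) : Prop :=
  ∃ g, groups[i]? = some g ∧ c ∈ g

-- group i contains a point adjacent to q
def PAdj (q : Int × Int) (groups : List (List (Int × Int))) (i : Nat) : Prop :=
  ∃ g, groups[i]? = some g ∧ pvAnyAdj q g = true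

-- the invariant of B's dictionary
def DInv (groups : List (List (Int × Int))) (d : PySem.Dict (Int × Int) Nat) : Prop :=
  ∀ c m, d.get? c = some m ↔ (SAt groups c m ∧ ∀ j, SAt groups c j → m ≤ j)

lemma exists_least {P : Nat → Prop} (h : ∃ n, P n) : ∃ m, P m ∧ ∀ j, P j → m ≤ j := by
  haveI := Classical.decPred P
  exact ⟨Nat.find h, Nat.find_spec h, fun j hj => Nat.find_min' h hj⟩

lemma mem_nbrs_iff (q p : Int × Int) :
    p ∈ pvNbrs q ↔ (|q.1 - p.1| ≤ 1 ∧ |q.2 - p.2| ≤ 1) := by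
  obtain ⟨qx, qy⟩ := q; obtain ⟨px, py⟩ := p
  simp [pvNbrs, Prod.ext_iff, abs_le]
  omega

lemma anyAdj_iff (q : Int × Int) (g : List (Int × Int)) :
    pvAnyAdj q g = true ↔ ∃ c ∈ pvNbrs q, c ∈ g := by
  simp only [pvAnyAdj, List.any_eq_true, Bool.and_eq_true, decide_eq_true_eq]
  constructor
  · rintro ⟨p, hp, h1, h2⟩; exact ⟨p, (mem_nbrs_iff q p).2 ⟨h1, h2⟩, hp⟩
  · rintro ⟨c, hc, hcg⟩; obtain ⟨h1, h2⟩ := (mem_nbrs_iff q c).1 hc; exact ⟨c, hcg, h1, h2⟩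

lemma PAdj_iff (q : Int × Int) (groups : List (List (Int × Int))) (i : Nat) :
    PAdj q groups i ↔ ∃ c ∈ pvNbrs q, SAt groups c i := by
  constructor
  · rintro ⟨g, hg, ha⟩
    obtain ⟨c, hc, hcg⟩ := (anyAdj_iff q g).1 ha
    exact ⟨c, hc, g, hg, hcg⟩
  · rintro ⟨c, hc, g, hg, hcg⟩
    exact ⟨g, hg, (anyAdj_iff q g).2 ⟨c, hc, hcg⟩⟩

-- A's scan on a no-match input appends a new singleton group
lemma insertA_none (q : Int × Int) (groups : List (List (Int × Int)))
    (h : ∀ i, ¬ PAdj q groups i) : pvInsertA q groups = groups ++ [[q]] := by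
  induction groups with
  | nil => rfl
  | cons g gs ih =>
    have hg : pvAnyAdj q g = false := by
      by_contra hb
      exact h 0 ⟨g, rfl, by simpa using hb⟩
    rw [pvInsertA, hg]
    simp only [Bool.false_eq_true, if_false, List.cons_append, List.cons.injEq, true_and]
    exact ih (fun i hi => h (i + 1) (by obtain ⟨g', hg', ha⟩ := hi; exact ⟨g', by simpa using hg', ha⟩))

-- A's scan appends q to the least matching group index
lemma insertA_some (q : Int × Int) (groups : List (List (Int × Int))) (i : Nat)
    (hi : PAdj q groups i) (hleast : ∀ j, PAdj q groups j → i ≤ j) :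
    pvInsertA q groups = pvAppendAt q groups i := by
  induction groups generalizing i with
  | nil => obtain ⟨g, hg, _⟩ := hi; simp at hg
  | cons g gs ih =>
    by_cases hg : pvAnyAdj q g = true
    · have h0 : i = 0 := Nat.le_zero.1 (hleast 0 ⟨g, rfl, hg⟩)
      subst h0
      rw [pvInsertA, hg]; rfl
    · have hi0 : i ≠ 0 := by
        rintro rfl
        obtain ⟨g', hg', ha⟩ := hi
        simp only [List.getElem?_cons_zero, Option.some.injEq] at hg'
        exact hg (hg' ▸ ha)
      obtain ⟨i', rfl⟩ := Nat.exists_eq_succ_of_ne_zero hi0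
      rw [pvInsertA, if_neg (by simpa using hg), pvAppendAt]
      congr 1
      apply ih i'
      · obtain ⟨g', hg', ha⟩ := hi; exact ⟨g', by simpa using hg', ha⟩
      · intro j hj
        obtain ⟨g', hg', ha⟩ := hj
        have := hleast (j + 1) ⟨g', by simpa using hg', ha⟩
        omega

lemma getElem?_appendAt (q : Int × Int) (groups : List (List (Int × Int))) (i j : Nat) :
    (pvAppendAt q groups i)[j]? =
      if j = i then (groups[j]?).map (fun g => g ++ [q]) else groups[j]? := by
  induction groups generalizing i j with
  | nil => simp [pvAppendAt]
  | cons g gs ih =>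
    cases i with
    | zero =>
      cases j with
      | zero => simp [pvAppendAt]
      | succ j' => simp [pvAppendAt]
    | succ i' =>
      cases j with
      | zero => simp [pvAppendAt]
      | succ j' => simpa [pvAppendAt] using ih i' j'

lemma SAt_appendAt (q : Int × Int) (groups : List (List (Int × Int))) (i : Nat)
    (hi : ∃ g, groups[i]? = some g) (c : Int × Int) (j : Nat) :
    SAt (pvAppendAt q groups i) c j ↔ SAt groups c j ∨ (j = i ∧ c = q) := by
  unfold SAt
  rw [getElem?_appendAt]
  by_cases hji : j = i
  · subst hji
    obtain ⟨g0, hg0⟩ := hi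
    rw [if_pos rfl, hg0, Option.map_some]
    constructor
    · rintro ⟨g, hg, hc⟩
      obtain rfl : g0 ++ [q] = g := Option.some.inj hg
      rcases List.mem_append.1 hc with h | h
      · exact Or.inl ⟨g0, rfl, h⟩
      · exact Or.inr ⟨rfl, by simpa using h⟩
    · rintro (⟨g, hg, hc⟩ | ⟨_, hcq⟩)
      · obtain rfl : g0 = g := Option.some.inj hg
        exact ⟨g0 ++ [q], rfl, List.mem_append.2 (Or.inl hc)⟩
      · exact ⟨g0 ++ [q], rfl, List.mem_append.2 (Or.inr (by simp [hcq]))⟩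
  · rw [if_neg hji]
    constructor
    · exact Or.inl
    · rintro (h | ⟨h, _⟩)
      · exact h
      · exact absurd h hji

lemma SAt_append_new (q : Int × Int) (groups : List (List (Int × Int))) (c : Int × Int) (j : Nat) :
    SAt (groups ++ [[q]]) c j ↔ SAt groups c j ∨ (j = groups.length ∧ c = q) := by
  unfold SAt
  rcases Nat.lt_trichotomy j groups.length with h | h | h
  · rw [List.getElem?_append_left h]
    constructor
    · exact Or.inl
    · rintro (hh | ⟨hh, _⟩)
      · exact hh
      · omega
  · subst h
    rw [List.getElem?_append_right (le_refl _), Nat.sub_self]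
    constructor
    · rintro ⟨g, hg, hc⟩
      obtain rfl : [q] = g := Option.some.inj hg
      exact Or.inr ⟨rfl, by simpa using hc⟩
    · rintro (⟨g, hg, _⟩ | ⟨_, hcq⟩)
      · rw [List.getElem?_eq_none (le_refl _)] at hg
        simp at hg
      · exact ⟨[q], rfl, by simp [hcq]⟩
  · have h1 : (groups ++ [[q]])[j]? = none := List.getElem?_eq_none (by simp; omega)
    have h2 : groups[j]? = none := List.getElem?_eq_none (by omega)
    rw [h1, h2]
    constructor
    · rintro ⟨g, hg, _⟩
      simp at hg
    · rintro (⟨g, hg, _⟩ | ⟨hh, _⟩)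
      · simp at hg
      · omega

lemma foldl_min_mem (a : Nat) (l : List Nat) : l.foldl min a = a ∨ l.foldl min a ∈ l := by
  induction l generalizing a with
  | nil => simp
  | cons b bs ih =>
    simp only [List.foldl_cons, List.mem_cons]
    rcases ih (min a b) with h | h
    · rcases Nat.le_total a b with hab | hab
      · left; rw [h]; omega
      · right; left; rw [h]; omega
    · right; right; exact h

lemma foldl_min_le (a : Nat) (l : List Nat) : ∀ x, (x = a ∨ x ∈ l) → l.foldl min a ≤ x := by
  induction l generalizing a with
  | nil =>
    rintro x (rfl | h)
    · simp
    · simp at h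
  | cons b bs ih =>
    rintro x (rfl | h)
    · exact le_trans (ih (min x b) (min x b) (Or.inl rfl)) (by omega)
    · simp only [List.mem_cons] at h
      rcases h with rfl | h
      · exact le_trans (ih (min a x) (min a x) (Or.inl rfl)) (by omega)
      · exact ih (min a b) x (Or.inr h)

-- B's candidate list characterisation
lemma mem_cand_iff (q : Int × Int) (d : PySem.Dict (Int × Int) Nat) (x : Nat) :
    x ∈ (pvNbrs q).filterMap (fun c => d.get? c) ↔ ∃ c ∈ pvNbrs q, d.get? c = some x := by
  simp [List.mem_filterMap]

-- the dictionary update preserves the invariant, given the new shape of SAt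
lemma inv_upd (q : Int × Int) (groups groups' : List (List (Int × Int)))
    (d : PySem.Dict (Int × Int) Nat) (i : Nat) (hInv : DInv groups d)
    (hS : ∀ c j, SAt groups' c j ↔ SAt groups c j ∨ (j = i ∧ c = q)) :
    DInv groups' (pvUpd d q i) := by
  intro c m
  by_cases hcq : c = q
  · subst hcq
    cases hdq : d.get? c with
    | none =>
      have hempty : ∀ j, ¬ SAt groups c j := by
        intro j hj
        obtain ⟨m0, hm0, hleast⟩ := exists_least ⟨j, hj⟩
        have := (hInv c m0).2 ⟨hm0, hleast⟩
        rw [hdq] at this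
        simp at this
      simp only [pvUpd, hdq]
      rw [PySem.Dict.get?_insert_self]
      constructor
      · rintro h
        simp only [Option.some.injEq] at h; subst h
        refine ⟨(hS c i).2 (Or.inr ⟨rfl, rfl⟩), fun j hj => ?_⟩
        rcases (hS c j).1 hj with h' | ⟨rfl, _⟩
        · exact absurd h' (hempty j)
        · exact le_refl _
      · rintro ⟨hm, _⟩
        rcases (hS c m).1 hm with h' | ⟨rfl, _⟩
        · exact absurd h' (hempty m)
        · rfl
    | some m0 =>
      have hm0 := (hInv c m0).1 hdq
      simp only [pvUpd, hdq]
      by_cases him : i < m0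
      · rw [if_pos him, PySem.Dict.get?_insert_self]
        constructor
        · rintro h
          simp only [Option.some.injEq] at h; subst h
          refine ⟨(hS c i).2 (Or.inr ⟨rfl, rfl⟩), fun j hj => ?_⟩
          rcases (hS c j).1 hj with h' | ⟨rfl, _⟩
          · exact le_trans (le_of_lt him) (hm0.2 j h')
          · exact le_refl _
        · rintro ⟨hm, hle⟩
          have h1 : m ≤ i := hle i ((hS c i).2 (Or.inr ⟨rfl, rfl⟩))
          rcases (hS c m).1 hm with h' | ⟨rfl, _⟩
          · exfalso
            have := hm0.2 m h'
            omega
          · rfl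
      · rw [if_neg him, hdq]
        constructor
        · rintro h
          simp only [Option.some.injEq] at h; subst h
          refine ⟨(hS c m0).2 (Or.inl hm0.1), fun j hj => ?_⟩
          rcases (hS c j).1 hj with h' | ⟨rfl, _⟩
          · exact hm0.2 j h'
          · omega
        · rintro ⟨hm, hle⟩
          have h1 : m ≤ m0 := hle m0 ((hS c m0).2 (Or.inl hm0.1))
          rcases (hS c m).1 hm with h' | ⟨rfl, _⟩
          · have h2 := hm0.2 m h'
            have h3 : m0 = m := by omega
            rw [h3]
          · have h3 : m0 = m := by omega
            rw [h3]
  · have hget : (pvUpd d q i).get? c = d.get? c := by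
      cases hq : d.get? q with
      | none =>
        simp only [pvUpd, hq]
        exact PySem.Dict.get?_insert_of_ne _ _ hcq
      | some m0 =>
        simp only [pvUpd, hq]
        by_cases him : i < m0
        · rw [if_pos him]; exact PySem.Dict.get?_insert_of_ne _ _ hcq
        · rw [if_neg him]
    have hSc : ∀ j, SAt groups' c j ↔ SAt groups c j := by
      intro j
      rw [hS c j]
      constructor
      · rintro (h | ⟨_, hc2⟩)
        · exact h
        · exact absurd hc2 hcq
      · exact Or.inl
    rw [hget, hInv c m]
    constructor
    · rintro ⟨h1, h2⟩; exact ⟨(hSc m).2 h1, fun j hj => h2 j ((hSc j).1 hj)⟩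
    · rintro ⟨h1, h2⟩; exact ⟨(hSc m).1 h1, fun j hj => h2 j ((hSc j).2 hj)⟩

-- the key step lemma: on an invariant state, B's step produces A's group list and keeps the invariant
lemma stepB_eq (q : Int × Int) (groups : List (List (Int × Int)))
    (d : PySem.Dict (Int × Int) Nat) (hInv : DInv groups d) :
    (pvStepB (groups, d) q).1 = pvInsertA q groups ∧
      DInv (pvStepB (groups, d) q).1 (pvStepB (groups, d) q).2 := by
  have hleast_of_S : ∀ c j, SAt groups c j → ∃ m, d.get? c = some m ∧ m ≤ j := by
    intro c j hj
    obtain ⟨m0, hm0, hl⟩ := exists_least ⟨j, hj⟩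
    exact ⟨m0, (hInv c m0).2 ⟨hm0, hl⟩, hl j hj⟩
  cases hcand : (pvNbrs q).filterMap (fun c => d.get? c) with
  | nil =>
    have hnone : ∀ i, ¬ PAdj q groups i := by
      intro i hi
      obtain ⟨c, hc, hS⟩ := (PAdj_iff q groups i).1 hi
      obtain ⟨m, hm, _⟩ := hleast_of_S c i hS
      have : m ∈ (pvNbrs q).filterMap (fun c => d.get? c) := (mem_cand_iff q d m).2 ⟨c, hc, hm⟩
      rw [hcand] at this; simp at this
    have hfst : pvStepB (groups, d) q = (groups ++ [[q]], pvUpd d q groups.length) := by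
      unfold pvStepB
      rw [hcand]
    refine ⟨?_, ?_⟩
    · rw [hfst, insertA_none q groups hnone]
    · rw [hfst]
      exact inv_upd q groups _ d _ hInv (fun c j => SAt_append_new q groups c j)
  | cons c0 cs =>
    set i := cs.foldl min c0 with hidef
    have hmemi : i ∈ (pvNbrs q).filterMap (fun c => d.get? c) := by
      rw [hcand]
      rcases foldl_min_mem c0 cs with h | h
      · rw [hidef, h]; exact List.mem_cons_self
      · exact List.mem_cons_of_mem _ h
    have hPi : PAdj q groups i := by
      obtain ⟨c, hc, hm⟩ := (mem_cand_iff q d i).1 hmemi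
      exact (PAdj_iff q groups i).2 ⟨c, hc, ((hInv c i).1 hm).1⟩
    have hleast : ∀ j, PAdj q groups j → i ≤ j := by
      intro j hj
      obtain ⟨c, hc, hS⟩ := (PAdj_iff q groups j).1 hj
      obtain ⟨m, hm, hmj⟩ := hleast_of_S c j hS
      have hmc : m ∈ (pvNbrs q).filterMap (fun c => d.get? c) := (mem_cand_iff q d m).2 ⟨c, hc, hm⟩
      rw [hcand] at hmc
      simp only [List.mem_cons] at hmc
      have : i ≤ m := foldl_min_le c0 cs m (by tauto)
      omega
    have hfst : pvStepB (groups, d) q = (pvAppendAt q groups i, pvUpd d q i) := by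
      unfold pvStepB
      rw [hcand]
    have hex : ∃ g, groups[i]? = some g := by
      obtain ⟨g, hg, _⟩ := hPi; exact ⟨g, hg⟩
    refine ⟨?_, ?_⟩
    · rw [hfst, insertA_some q groups i hPi hleast]
    · rw [hfst]
      exact inv_upd q groups _ d i hInv (fun c j => SAt_appendAt q groups i hex c j)

lemma loop_eq (pts : List (Int × Int)) :
    ∀ (groups : List (List (Int × Int))) (d : PySem.Dict (Int × Int) Nat), DInv groups d →
      (pts.foldl pvStepB (groups, d)).1 = pts.foldl (fun acc q => pvInsertA q acc) groups := by
  induction pts with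
  | nil => intro groups d _; rfl
  | cons q pts ih =>
    intro groups d hDInv
    obtain ⟨hfst, hinv'⟩ := stepB_eq q groups d hDInv
    simp only [List.foldl_cons]
    have h2 := ih (pvStepB (groups, d) q).1 (pvStepB (groups, d) q).2 hinv'
    rw [← hfst]
    exact h2

lemma inv_empty : DInv [] PySem.Dict.empty := by
  intro c m
  simp only [PySem.Dict.get?_empty]
  constructor
  · intro h
    simp at h
  · rintro ⟨⟨g, hg, _⟩, _⟩
    simp at hg

-- ===== VERDICT (by name: the statement is the Claim_ definition above) =====
theorem group_frontier_spec : Claim_equal_group_frontier := by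
  intro pts _
  unfold Spec_group_frontier group_frontier group_frontier_alt
  exact (loop_eq pts [] PySem.Dict.empty inv_empty).symm
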